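-- pv_equiv track=rewrite | github.com/pybricks/pybricks-micropython | lib/pbio/tools/fontconvert.py | read_image_bitmap
-- ===== SOURCE A (Python) =====
-- def read_image_bitmap(pixels: list[list[int]]) -> list[int]:
--     """Read a glyph bitmap from image data."""
--     bitmap: list[int] = []
--     for row in pixels:
--         n_bytes = (len(row) + 7) // 8
--         msb = n_bytes * 8 - 1
--         binary = sum(1 << (msb - i) if p < 128 else 0 for (i, p) in enumerate(row))
--         bitmap.extend(binary.to_bytes(n_bytes, byteorder="big"))
--     return bitmap
-- ===== SOURCE B (Python) =====
-- def _pack_row(row):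
--     out = bytearray()
--     byte = 0
--     count = 0
--     for p in row:
--         byte = (byte << 1) | (1 if p < 128 else 0)
--         count += 1
--         if count == 8:
--             out.append(byte)
--             byte = 0
--             count = 0
--     if count:
--         out.append(byte << (8 - count))
--     return out
--
--
-- def read_image_bitmap(pixels: list[list[int]]) -> list[int]:
--     """Read a glyph bitmap from image data."""
--     bitmap: list[int] = []
--     for row in pixels:
--         bitmap.extend(_pack_row(row))
--     return bitmap
-- ===== Notes on version B (the rewrite author's own statement) =====
-- stated objective: idiomatic
-- what changed: Replaces the per-row big-integer sum over enumerate plus int.to_bytes with a single streaming pass that packs bits into a byte accumulator, emitting a byte every 8 pixels and left-padding the final partial byte.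
import Mathlib
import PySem

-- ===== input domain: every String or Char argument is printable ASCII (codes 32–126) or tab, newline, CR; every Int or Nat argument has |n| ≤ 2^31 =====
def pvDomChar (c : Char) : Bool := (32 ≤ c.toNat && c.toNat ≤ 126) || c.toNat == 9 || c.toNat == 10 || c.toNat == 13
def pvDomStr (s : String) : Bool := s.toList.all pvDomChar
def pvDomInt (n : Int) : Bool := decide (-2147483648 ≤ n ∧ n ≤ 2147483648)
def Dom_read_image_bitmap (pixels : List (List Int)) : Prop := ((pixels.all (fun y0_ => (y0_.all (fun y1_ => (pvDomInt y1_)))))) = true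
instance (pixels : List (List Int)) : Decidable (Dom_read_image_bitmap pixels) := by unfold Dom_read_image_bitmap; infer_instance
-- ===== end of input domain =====

-- B packs each row in one streaming pass with a byte accumulator and bit counter instead of
-- building a per-row big integer and calling int.to_bytes (objective: idiomatic).

-- ===== PORT A =====
-- int.to_bytes(n, "big") for a nonnegative integer: n bytes, big-endian (builtin, implemented here).
def toBytesBE : Nat → Int → List Int
  | 0, _ => []
  | n + 1, x => toBytesBE n (PySem.Int.floordiv x 256) ++ [PySem.Int.mod x 256]

def read_image_bitmap (pixels : List (List Int)) : List Int :=
  pixels.foldl (fun bitmap row =>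
    let n_bytes : Int := PySem.Int.floordiv ((row.length : Int) + 7) 8
    let msb : Int := n_bytes * 8 - 1
    -- 1 << (msb - i): exact as 2 ^ (msb - i).toNat since msb - i ≥ 0 for every enumerated index i
    let binary : Int := (PySem.List.enumerate row 0).foldl
      (fun s ip => s + (if ip.2 < 128 then 2 ^ (msb - ip.1).toNat else 0)) 0
    bitmap ++ toBytesBE n_bytes.toNat binary) []

-- ===== PORT B =====
def packStep (s : List Int × Int × Nat) (p : Int) : List Int × Int × Nat :=
  let byte := s.2.1 * 2 + (if p < 128 then 1 else 0)
  let count := s.2.2 + 1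
  if count == 8 then (s.1 ++ [byte], 0, 0) else (s.1, byte, count)

def packRow (row : List Int) : List Int :=
  let s := row.foldl packStep ([], 0, 0)
  if s.2.2 == 0 then s.1 else s.1 ++ [s.2.1 * 2 ^ (8 - s.2.2)]

def read_image_bitmap_alt (pixels : List (List Int)) : List Int :=
  pixels.foldl (fun bitmap row => bitmap ++ packRow row) []

-- ===== PRECONDITION & SPEC =====
def Spec_read_image_bitmap (pixels : List (List Int)) (out : List Int) : Prop := out = read_image_bitmap_alt pixels
instance (pixels : List (List Int)) (out : List Int) : Decidable (Spec_read_image_bitmap pixels out) := by unfold Spec_read_image_bitmap; infer_instance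

-- ===== CLAIM (what is proved, stated in full; the proofs are below) =====
def Claim_equal_read_image_bitmap : Prop := ∀ (pixels : List (List Int)), Dom_read_image_bitmap pixels → Spec_read_image_bitmap pixels (read_image_bitmap pixels)

-- ===== LEMMAS AND PROOFS =====

-- bit value of a pixel
def pvBit (p : Int) : Int := if p < 128 then 1 else 0

-- MSB-first value of a row of bits
def pvV (row : List Int) : Int := row.foldl (fun b p => b * 2 + pvBit p) 0

theorem pvBit_nonneg (p : Int) : 0 ≤ pvBit p := by
  unfold pvBit; split <;> norm_num

theorem pvBit_lt (p : Int) : pvBit p < 2 := by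
  unfold pvBit; split <;> norm_num

theorem pvV_shift (row : List Int) : ∀ (b : Int),
    row.foldl (fun b p => b * 2 + pvBit p) b = b * 2 ^ row.length + pvV row := by
  induction row with
  | nil => intro b; simp [pvV]
  | cons p r ih =>
    intro b
    simp only [pvV, List.foldl_cons, List.length_cons] at *
    rw [ih, ih (0 * 2 + pvBit p)]
    ring

theorem pvV_cons (p : Int) (r : List Int) :
    pvV (p :: r) = pvBit p * 2 ^ r.length + pvV r := by
  show List.foldl _ (0 * 2 + pvBit p) r = _
  rw [pvV_shift]
  ring

theorem pvV_bounds (row : List Int) : 0 ≤ pvV row ∧ pvV row < 2 ^ row.length := by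
  induction row with
  | nil => simp [pvV]
  | cons p r ih =>
    rw [pvV_cons, List.length_cons]
    have h1 := pvBit_nonneg p
    have h2 := pvBit_lt p
    have h3 : (0:Int) < 2 ^ r.length := by positivity
    constructor
    · nlinarith
    · have : pvBit p * 2 ^ r.length ≤ 2 ^ r.length := by nlinarith
      rw [pow_succ]
      nlinarith

theorem pvV_append (t r : List Int) : pvV (t ++ r) = pvV t * 2 ^ r.length + pvV r := by
  induction t with
  | nil => simp [pvV]
  | cons p t ih =>
    rw [List.cons_append, pvV_cons, pvV_cons, ih, List.length_append, pow_add]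
    ring

-- A's per-row sum
theorem pvSumEnum (row : List Int) : ∀ (s m : Int) (acc : Int), 0 ≤ s →
    s + row.length ≤ m + 1 →
    (PySem.List.enumerate row s).foldl
      (fun a ip => a + (if ip.2 < 128 then 2 ^ (m - ip.1).toNat else 0)) acc
    = acc + pvV row * 2 ^ ((m + 1 - s).toNat - row.length) := by
  induction row with
  | nil => intro s m acc _ _; simp [pvV, PySem.List.enumerate]
  | cons p r ih =>
    intro s m acc hs h
    simp only [List.length_cons] at h
    rw [PySem.List.enumerate_cons, List.foldl_cons,
        ih (s + 1) m _ (by omega) (by omega), pvV_cons]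
    have e1 : (m + 1 - (s + 1)) = m - s := by ring
    have e2 : (m + 1 - s).toNat - (r.length + 1) = (m - s).toNat - r.length := by omega
    have e3 : (2:Int) ^ (m - s).toNat = 2 ^ r.length * 2 ^ ((m - s).toNat - r.length) := by
      rw [← pow_add]
      congr 1
      omega
    rw [List.length_cons, e1, e2]
    unfold pvBit
    split
    · rw [e3]; ring
    · ring

-- front-peel a big-endian byte dump
theorem toBytesBE_peel (b : Int) (hb0 : 0 ≤ b) (hb : b < 256) :
    ∀ (n : Nat) (r : Int), 0 ≤ r → r < 2 ^ (8 * n) →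
    toBytesBE (n + 1) (b * 2 ^ (8 * n) + r) = b :: toBytesBE n r := by
  intro n
  induction n with
  | zero =>
    intro r hr0 hr
    obtain rfl : r = 0 := by omega
    show toBytesBE 0 _ ++ [_] = _
    simp [toBytesBE, Int.emod_eq_of_lt hb0 (by simpa using hb)]
  | succ n ih =>
    intro r hr0 hr
    have h256 : (0:Int) < 256 := by norm_num
    have hx : b * 2 ^ (8 * (n + 1)) + r = r + b * 2 ^ (8 * n) * 256 := by
      rw [show 8 * (n + 1) = 8 * n + 8 from by ring, pow_add]
      ring
    have hdiv : (r + b * 2 ^ (8 * n) * 256) / 256 = b * 2 ^ (8 * n) + r / 256 := by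
      rw [Int.add_mul_ediv_right _ _ (by norm_num : (256:Int) ≠ 0)]
      ring
    have hmod : (r + b * 2 ^ (8 * n) * 256) % 256 = r % 256 :=
      Int.add_mul_emod_self_right r (b * 2 ^ (8 * n)) 256
    have hq0 : 0 ≤ r / 256 := Int.ediv_nonneg hr0 (by norm_num)
    have hq : r / 256 < 2 ^ (8 * n) := by
      rw [Int.ediv_lt_iff_lt_mul h256]
      calc r < 2 ^ (8 * (n + 1)) := hr
        _ = 2 ^ (8 * n) * 256 := by rw [show 8 * (n + 1) = 8 * n + 8 from by ring, pow_add]; norm_num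
    show toBytesBE (n + 1 + 1) _ = b :: (toBytesBE n _ ++ [_])
    rw [show toBytesBE (n + 1 + 1) (b * 2 ^ (8 * (n + 1)) + r)
          = toBytesBE (n + 1) (PySem.Int.floordiv (b * 2 ^ (8 * (n + 1)) + r) 256)
            ++ [PySem.Int.mod (b * 2 ^ (8 * (n + 1)) + r) 256] from rfl,
        PySem.Int.floordiv_eq_ediv_of_pos h256, PySem.Int.mod_eq_emod_of_pos h256,
        PySem.Int.floordiv_eq_ediv_of_pos h256, PySem.Int.mod_eq_emod_of_pos h256,
        hx, hdiv, hmod, ih (r / 256) hq0 hq]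
    simp

-- packStep only appends to the output component
theorem packStep_out (row : List Int) : ∀ (out : List Int) (b : Int) (c : Nat),
    row.foldl packStep (out, b, c) =
      ((out ++ (row.foldl packStep ([], b, c)).1, (row.foldl packStep ([], b, c)).2)) := by
  induction row with
  | nil => intro out b c; simp
  | cons p r ih =>
    intro out b c
    simp only [List.foldl_cons, packStep]
    by_cases h8 : c + 1 = 8
    · simp only [h8, BEq.rfl, if_pos]
      rw [ih (out ++ [b * 2 + if p < 128 then 1 else 0]) 0 0,
          ih ([] ++ [b * 2 + if p < 128 then 1 else 0]) 0 0]
      simp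
    · have : ¬ ((c + 1) == 8) = true := by simpa using h8
      simp only [this, if_neg, Bool.false_eq_true, not_false_eq_true]
      rw [ih out _ _, ih [] _ _]

-- a partial chunk never triggers the append
theorem packStep_part (row : List Int) : ∀ (b : Int) (c : Nat), c + row.length < 8 →
    row.foldl packStep ([], b, c) = ([], row.foldl (fun b p => b * 2 + pvBit p) b, c + row.length) := by
  induction row with
  | nil => intro b c _; simp
  | cons p r ih =>
    intro b c h
    simp only [List.length_cons] at h
    simp only [List.foldl_cons, packStep]
    have h8 : ¬ ((c + 1) == 8) = true := by simp; omega
    simp only [h8, Bool.false_eq_true, not_false_eq_true, if_neg]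
    rw [ih _ (c + 1) (by omega)]
    simp only [pvBit, Prod.mk.injEq, true_and, List.length_cons]
    omega

-- a full chunk of 8 emits exactly its byte value
theorem packStep_chunk (row : List Int) (h : row.length = 8) :
    row.foldl packStep ([], 0, 0) = ([pvV row], 0, 0) := by
  rcases row with _ | ⟨a1, row⟩; · simp at h
  rcases row with _ | ⟨a2, row⟩; · simp at h
  rcases row with _ | ⟨a3, row⟩; · simp at h
  rcases row with _ | ⟨a4, row⟩; · simp at h
  rcases row with _ | ⟨a5, row⟩; · simp at h
  rcases row with _ | ⟨a6, row⟩; · simp at h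
  rcases row with _ | ⟨a7, row⟩; · simp at h
  rcases row with _ | ⟨a8, row⟩; · simp at h
  rcases row with _ | ⟨a9, row⟩
  · simp [packStep, pvV, pvBit]
  · simp at h

-- the main per-row equality
theorem pvRow_eq (L : Nat) : ∀ (row : List Int), row.length = L →
    toBytesBE ((L + 7) / 8) (pvV row * 2 ^ (8 * ((L + 7) / 8) - L)) = packRow row := by
  induction L using Nat.strong_induction_on with
  | _ L ih =>
  intro row hL
  by_cases h0 : L = 0
  · subst h0
    obtain rfl : row = [] := List.eq_nil_of_length_eq_zero hL
    simp [packRow, toBytesBE]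
  by_cases h8 : L < 8
  · -- one partial byte
    have hnB : (L + 7) / 8 = 1 := by omega
    have hb := pvV_bounds row
    rw [hL] at hb
    have hpow : (0:Int) < 2 ^ (8 * 1 - L) := by positivity
    have hx0 : (0:Int) ≤ pvV row * 2 ^ (8 * 1 - L) := mul_nonneg hb.1 (le_of_lt hpow)
    have hx : pvV row * 2 ^ (8 * 1 - L) < 256 := by
      calc pvV row * 2 ^ (8 * 1 - L) < 2 ^ L * 2 ^ (8 * 1 - L) :=
            mul_lt_mul_of_pos_right hb.2 hpow
        _ = 2 ^ (L + (8 * 1 - L)) := by rw [pow_add]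
        _ = 256 := by rw [show L + (8 * 1 - L) = 8 from by omega]; norm_num
    rw [hnB]
    show toBytesBE 0 _ ++ [_] = _
    rw [show toBytesBE 0 (PySem.Int.floordiv (pvV row * 2 ^ (8 * 1 - L)) 256) = [] from rfl,
        PySem.Int.mod_eq_emod_of_pos (by norm_num), Int.emod_eq_of_lt hx0 hx]
    unfold packRow
    rw [packStep_part row 0 0 (by omega)]
    have hL0 : ¬ ((0 + row.length) == 0) = true := by simpa [hL] using h0
    simp only [hL0, Bool.false_eq_true, not_false_eq_true, if_neg]
    rw [hL, show 8 * 1 - L = 8 - (0 + L) from by omega]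
    simp [pvV]
  · -- L ≥ 8 : peel a full byte off the front
    rw [not_lt] at h8
    have hsplit := (List.take_append_drop 8 row).symm
    set t := row.take 8 with htdef
    set r := row.drop 8 with hrdef
    have ht : t.length = 8 := by simp [htdef, hL]; omega
    have hr : r.length = L - 8 := by simp [hrdef, hL]
    have ihr := ih (L - 8) (by omega) r hr
    have hnB : (L + 7) / 8 = ((L - 8) + 7) / 8 + 1 := by omega
    set n := ((L - 8) + 7) / 8 with hndef
    have hLn : L ≤ 8 * (n + 1) := by omega
    have hLn' : L - 8 ≤ 8 * n := by omega
    have hpack : packRow row = pvV t :: packRow r := by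
      unfold packRow
      rw [hsplit, List.foldl_append, packStep_chunk t ht, packStep_out r [pvV t] 0 0]
      by_cases hy : (List.foldl packStep ([], 0, 0) r).2.2 = 0 <;> simp [hy]
    have hVs : pvV row = pvV t * 2 ^ (L - 8) + pvV r := by
      rw [hsplit, pvV_append, hr]
    have key : pvV row * 2 ^ (8 * ((L + 7) / 8) - L)
        = pvV t * 2 ^ (8 * n) + pvV r * 2 ^ (8 * n - (L - 8)) := by
      have e1 : 8 * ((L + 7) / 8) - L = 8 * n - (L - 8) := by omega
      have e2 : (L - 8) + (8 * n - (L - 8)) = 8 * n := by omega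
      rw [hVs, e1, add_mul, mul_assoc, ← pow_add, e2]
    have hbt := pvV_bounds t
    rw [ht] at hbt
    have hbr := pvV_bounds r
    rw [hr] at hbr
    have hxr0 : (0:Int) ≤ pvV r * 2 ^ (8 * n - (L - 8)) :=
      mul_nonneg hbr.1 (by positivity)
    have hxr : pvV r * 2 ^ (8 * n - (L - 8)) < 2 ^ (8 * n) := by
      have hp : (0:Int) < 2 ^ (8 * n - (L - 8)) := by positivity
      calc pvV r * 2 ^ (8 * n - (L - 8)) < 2 ^ (L - 8) * 2 ^ (8 * n - (L - 8)) :=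
            mul_lt_mul_of_pos_right hbr.2 hp
        _ = 2 ^ ((L - 8) + (8 * n - (L - 8))) := by rw [pow_add]
        _ = 2 ^ (8 * n) := by rw [show (L - 8) + (8 * n - (L - 8)) = 8 * n from by omega]
    rw [key, hnB, toBytesBE_peel (pvV t) hbt.1 (by simpa using hbt.2) n _ hxr0 hxr, ihr, hpack]

theorem pvRowA_eq (row : List Int) :
    toBytesBE (PySem.Int.floordiv ((row.length : Int) + 7) 8).toNat
      ((PySem.List.enumerate row 0).foldl
        (fun s ip => s +
          (if ip.2 < 128 then
            2 ^ (PySem.Int.floordiv ((row.length : Int) + 7) 8 * 8 - 1 - ip.1).toNat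
          else 0)) 0) = packRow row := by
  have hcast : ((row.length : Int) + 7) = ((row.length + 7 : Nat) : Int) := by push_cast; ring
  have hfd : PySem.Int.floordiv ((row.length : Int) + 7) 8
      = (((row.length + 7) / 8 : Nat) : Int) := by
    rw [hcast]
    exact_mod_cast PySem.Int.floordiv_natCast (row.length + 7) 8
  set nB : Nat := (row.length + 7) / 8 with hnBdef
  have hLnB : row.length ≤ 8 * nB := by omega
  have hsum := pvSumEnum row 0 ((nB : Int) * 8 - 1) 0 le_rfl (by omega)
  rw [hfd]
  have hmsb : ∀ (i : Int), ((nB : Int) * 8 - 1 - i) = ((nB : Int) * 8 - 1) - i := by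
    intro i; ring
  rw [hsum, Int.toNat_natCast]
  have e1 : (((nB : Int) * 8 - 1) + 1 - 0).toNat - row.length = 8 * nB - row.length := by omega
  rw [e1, zero_add]
  exact pvRow_eq row.length row rfl

-- ===== VERDICT (by name: the statement is the Claim_ definition above) =====
theorem read_image_bitmap_spec : Claim_equal_read_image_bitmap := by
  intro pixels _
  unfold Spec_read_image_bitmap read_image_bitmap read_image_bitmap_alt
  congr 1
  funext bitmap row
  dsimp only
  rw [pvRowA_eq]
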